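-- pv_equiv track=rewrite | github.com/Vedqiibyol/MarkRight | previous/_main-2022-11-18.py | GetValid
-- ===== SOURCE A (Python) =====
-- _reserved = " \t\n\r\"!#$%&'()*+,-./:;<=>?@[\]^_`{|}~"
--
-- def GetValid(data) -> str:
-- 	head = 0
--
-- 	for i in data:
-- 		if i not in _reserved:
-- 			break
-- 		head += 1
--
-- 	tail = head
--
-- 	for i in data[head:]:
-- 		if i in _reserved:
-- 			break
-- 		tail += 1
--
-- 	return data[head:tail]
-- ===== SOURCE B (Python) =====
-- _reserved = " \t\n\r\"!#$%&'()*+,-./:;<=>?@[\]^_`{|}~"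
--
-- def GetValid(data) -> str:
--     tokens = ''.join((' ' if c in _reserved else c) for c in data).split()
--     return tokens[0] if tokens else ''
-- ===== Notes on version B (the rewrite author's own statement) =====
-- stated objective: alternative
-- what changed: Instead of A's two index-advancing scans with manual slicing, B normalises every reserved character to a space in one mapping pass, whitespace-splits the result into tokens, and returns the first token (or '' if there is none).
import Mathlib
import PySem

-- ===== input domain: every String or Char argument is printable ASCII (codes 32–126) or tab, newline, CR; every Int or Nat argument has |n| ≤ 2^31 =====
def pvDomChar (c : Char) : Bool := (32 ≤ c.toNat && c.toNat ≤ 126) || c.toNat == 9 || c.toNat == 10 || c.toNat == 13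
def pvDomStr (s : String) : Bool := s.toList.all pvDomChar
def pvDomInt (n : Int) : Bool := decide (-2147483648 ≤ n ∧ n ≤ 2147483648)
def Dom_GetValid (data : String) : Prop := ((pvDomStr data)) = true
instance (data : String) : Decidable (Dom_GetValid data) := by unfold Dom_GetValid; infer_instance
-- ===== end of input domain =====

-- B replaces A's two index-advancing scans and manual slicing by a different pipeline:
-- map every reserved char to a space, whitespace-split, return the first token ('' if none).

-- the module constant _reserved, as a character list
def pvReserved : List Char := (" \t\n\r\"!#$%&'()*+,-./:;<=>?@[\\]^_`{|}~").toList

def pvIsRes (c : Char) : Bool := pvReserved.contains c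

-- ===== PORT A =====
-- first loop: head = 0; for i in data: if i not in _reserved: break; head += 1
def pvHeadLoop : List Char → Nat
  | [] => 0
  | c :: cs => if pvIsRes c then pvHeadLoop cs + 1 else 0

-- second loop: tail counter over data[head:]: if i in _reserved: break; tail += 1
def pvTailLoop : List Char → Nat
  | [] => 0
  | c :: cs => if pvIsRes c then 0 else pvTailLoop cs + 1

def GetValid (data : String) : String :=
  let l := data.toList
  let head := pvHeadLoop l
  let tail := head + pvTailLoop (PySem.List.slice l (some (head : Int)) none)
  String.ofList (PySem.List.slice l (some (head : Int)) (some (tail : Int)))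

-- ===== PORT B =====
-- ' ' if c in _reserved else c, applied characterwise by the ''.join generator
def pvBlank (c : Char) : Char := if pvIsRes c then ' ' else c

def GetValid_alt (data : String) : String :=
  let tokens := PySem.Str.split₀ (String.ofList (data.toList.map pvBlank))  -- ''.join(...).split()
  tokens.headD ""                                                       -- tokens[0] if tokens else ''

-- ===== PRECONDITION & SPEC =====
def Spec_GetValid (data : String) (out : String) : Prop := out = GetValid_alt data
instance (data : String) (out : String) : Decidable (Spec_GetValid data out) := by unfold Spec_GetValid; infer_instance

-- ===== CLAIM (what is proved, stated in full; the proofs are below) =====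
def Claim_equal_GetValid : Prop := ∀ (data : String), Dom_GetValid data → Spec_GetValid data (GetValid data)

-- ===== LEMMAS AND PROOFS =====

-- taking a prefix of the length of a takeWhile recovers the takeWhile
theorem pv_take_len_takeWhile (l : List Char) (p : Char → Bool) :
    l.take (l.takeWhile p).length = l.takeWhile p := by
  induction l with
  | nil => rfl
  | cons c cs ih =>
    by_cases h : p c
    · simp [List.takeWhile_cons, h, ih]
    · simp [List.takeWhile_cons, h]

-- the target value both programs compute: first maximal run of non-reserved chars
def pvTok (l : List Char) : List Char :=
  (l.dropWhile pvIsRes).takeWhile (fun c => !pvIsRes c)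

theorem pv_drop_headLoop (l : List Char) : l.drop (pvHeadLoop l) = l.dropWhile pvIsRes := by
  induction l with
  | nil => rfl
  | cons c cs ih =>
    simp only [pvHeadLoop, List.dropWhile]
    by_cases h : pvIsRes c = true
    · simp [h, ih]
    · simp [h]

theorem pv_tailLoop_eq (l : List Char) :
    pvTailLoop l = (l.takeWhile (fun c => !pvIsRes c)).length := by
  induction l with
  | nil => rfl
  | cons c cs ih =>
    simp only [pvTailLoop, List.takeWhile_cons]
    by_cases h : pvIsRes c = true
    · simp [h]
    · simp [h, ih]

-- A computes pvTok
theorem pvA_eq (l : List Char) :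
    PySem.List.slice l (some ((pvHeadLoop l : Nat) : Int))
      (some ((pvHeadLoop l + pvTailLoop (PySem.List.slice l (some ((pvHeadLoop l : Nat) : Int)) none) : Nat) : Int))
      = pvTok l := by
  rw [PySem.List.slice_from_natCast, PySem.List.slice_natCast, pv_drop_headLoop,
    pv_tailLoop_eq, Nat.add_sub_cancel_left, pvTok]
  exact pv_take_len_takeWhile _ _

-- split₀.go: the accumulator factors out
theorem pv_split_go_acc (s : List Char) (cur : List Char) (acc : List (List Char)) :
    PySem.Chars.split₀.go s cur acc = acc.reverse ++ PySem.Chars.split₀.go s cur [] := by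
  induction s generalizing cur acc with
  | nil =>
    simp only [PySem.Chars.split₀.go]
    by_cases h : cur.isEmpty
    · simp [h]
    · simp [h]
  | cons c rest ih =>
    simp only [PySem.Chars.split₀.go]
    by_cases hs : PySem.Chars.isspace c
    · by_cases h : cur.isEmpty
      · simp only [hs, h, if_true]
        exact ih _ _
      · simp only [hs, h, if_true, if_false]
        rw [ih _ (cur.reverse :: acc), ih _ [cur.reverse]]
        simp
    · simp only [hs, if_false]
      exact ih _ _

-- head of go with a nonempty current token
theorem pv_go_head_cur (s : List Char) (cur : List Char) (hcur : cur ≠ []) :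
    (PySem.Chars.split₀.go s cur []).headD []
      = cur.reverse ++ s.takeWhile (fun c => !PySem.Chars.isspace c) := by
  induction s generalizing cur with
  | nil =>
    have h : cur.isEmpty = false := by simpa [List.isEmpty_iff] using hcur
    simp [PySem.Chars.split₀.go, h]
  | cons c rest ih =>
    simp only [PySem.Chars.split₀.go, List.takeWhile_cons]
    by_cases hs : PySem.Chars.isspace c
    · have h : cur.isEmpty = false := by simpa [List.isEmpty_iff] using hcur
      simp only [hs, h, if_true, Bool.not_true]
      rw [pv_split_go_acc rest [] [cur.reverse]]
      simp
    · simp only [hs, Bool.false_eq_true, if_false, Bool.not_false, if_true]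
      rw [ih (c :: cur) (by simp)]
      simp
    
-- first token of split() = takeWhile after dropWhile, on isspace
theorem pv_split₀_head (s : List Char) :
    (PySem.Chars.split₀ s).headD []
      = (s.dropWhile PySem.Chars.isspace).takeWhile (fun c => !PySem.Chars.isspace c) := by
  induction s with
  | nil => rfl
  | cons c rest ih =>
    simp only [PySem.Chars.split₀, PySem.Chars.split₀.go, List.dropWhile_cons]
    by_cases hs : PySem.Chars.isspace c
    · simp only [hs, if_true, List.isEmpty_nil]
      exact ih
    · simp only [hs, Bool.false_eq_true, if_false]
      rw [pv_go_head_cur rest [c] (by simp)]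
      simp [List.takeWhile_cons, hs]

-- on the domain, a mapped char is a space exactly when the original is reserved
theorem pv_isspace_blank (c : Char) (h : pvDomChar c = true) :
    PySem.Chars.isspace (pvBlank c) = pvIsRes c := by
  by_cases hr : pvIsRes c = true
  · simp [pvBlank, hr]; decide
  · have hr' : pvIsRes c = false := eq_false_of_ne_true hr
    simp only [pvBlank, hr', Bool.false_eq_true, if_false]
    by_contra hsp
    have hsp' : PySem.Chars.isspace c = true := by
      cases hq : PySem.Chars.isspace c
      · exact absurd hq hsp
      · rfl
    have hn : c.toNat = 32 ∨ c.toNat = 9 ∨ c.toNat = 10 ∨ c.toNat = 13 := by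
      have hd := h
      simp only [pvDomChar, Bool.or_eq_true, Bool.and_eq_true, decide_eq_true_eq,
        beq_iff_eq] at hd
      simp only [PySem.Chars.isspace, Bool.or_eq_true, Bool.and_eq_true,
        decide_eq_true_eq] at hsp'
      omega
    have hc : c = ' ' ∨ c = '\t' ∨ c = '\n' ∨ c = '\r' := by
      rcases hn with h32 | h9 | h10 | h13
      · exact Or.inl (Char.ext (UInt32.toNat_inj.mp (by rw [show c.val.toNat = c.toNat from rfl, h32]; rfl)))
      · exact Or.inr (Or.inl (Char.ext (UInt32.toNat_inj.mp (by rw [show c.val.toNat = c.toNat from rfl, h9]; rfl))))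
      · exact Or.inr (Or.inr (Or.inl (Char.ext (UInt32.toNat_inj.mp (by rw [show c.val.toNat = c.toNat from rfl, h10]; rfl)))))
      · exact Or.inr (Or.inr (Or.inr (Char.ext (UInt32.toNat_inj.mp (by rw [show c.val.toNat = c.toNat from rfl, h13]; rfl)))))
    rcases hc with rfl | rfl | rfl | rfl <;> exact absurd hr (by decide)

-- dropWhile/takeWhile commute with the blanking map on domain strings
theorem pv_dropWhile_map (l : List Char) (h : ∀ c ∈ l, pvDomChar c = true) :
    (l.map pvBlank).dropWhile PySem.Chars.isspace = (l.dropWhile pvIsRes).map pvBlank := by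
  induction l with
  | nil => rfl
  | cons c cs ih =>
    have hc := h c (by simp)
    have ih' := ih (fun x hx => h x (by simp [hx]))
    simp only [List.map_cons, List.dropWhile_cons, pv_isspace_blank c hc]
    by_cases hr : pvIsRes c = true
    · simp [hr, ih']
    · simp only [Bool.not_eq_true] at hr
      simp [hr]

theorem pv_takeWhile_map (l : List Char) (h : ∀ c ∈ l, pvDomChar c = true) :
    (l.map pvBlank).takeWhile (fun c => !PySem.Chars.isspace c)
      = (l.takeWhile (fun c => !pvIsRes c)).map pvBlank := by
  induction l with
  | nil => rfl
  | cons c cs ih =>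
    have hc := h c (by simp)
    have ih' := ih (fun x hx => h x (by simp [hx]))
    simp only [List.map_cons, List.takeWhile_cons, pv_isspace_blank c hc]
    by_cases hr : pvIsRes c = true
    · simp [hr]
    · simp only [Bool.not_eq_true] at hr
      simp [hr, ih']

-- pvBlank is the identity on the kept (non-reserved) run
theorem pv_map_id_takeWhile (l : List Char) :
    (l.takeWhile (fun c => !pvIsRes c)).map pvBlank = l.takeWhile (fun c => !pvIsRes c) := by
  induction l with
  | nil => rfl
  | cons c cs ih =>
    simp only [List.takeWhile_cons]
    by_cases hr : pvIsRes c = true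
    · simp [hr]
    · simp only [Bool.not_eq_true] at hr
      simp [hr, ih, pvBlank]

-- B computes pvTok on domain strings
theorem pvB_eq (l : List Char) (h : ∀ c ∈ l, pvDomChar c = true) :
    (PySem.Chars.split₀ (l.map pvBlank)).headD [] = pvTok l := by
  rw [pv_split₀_head, pvTok, pv_dropWhile_map l h]
  have h2 : ∀ c ∈ l.dropWhile pvIsRes, pvDomChar c = true :=
    fun c hc => h c ((List.dropWhile_sublist _).subset hc)
  rw [pv_takeWhile_map _ h2]
  exact pv_map_id_takeWhile _

-- ===== VERDICT (by name: the statement is the Claim_ definition above) =====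
theorem GetValid_spec : Claim_equal_GetValid := by
  intro data hdom
  unfold Spec_GetValid GetValid GetValid_alt
  have hdom' : ∀ c ∈ data.toList, pvDomChar c = true := by
    simpa [Dom_GetValid, pvDomStr, List.all_eq_true] using hdom
  have hB := pvB_eq data.toList hdom'
  have hmap : (PySem.Str.split₀ (String.ofList (List.map pvBlank data.toList))).map String.toList
      = PySem.Chars.split₀ (List.map pvBlank data.toList) := by
    rw [PySem.Str.split₀_map_toList, String.toList_ofList]
  show String.ofList _ = (PySem.Str.split₀ (String.ofList (data.toList.map pvBlank))).headD ""
  rw [pvA_eq data.toList]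
  cases hts : PySem.Str.split₀ (String.ofList (data.toList.map pvBlank)) with
  | nil =>
    rw [hts] at hmap
    rw [← hmap] at hB
    simp only [List.map_nil, List.headD_nil] at hB
    rw [← hB]
    rfl
  | cons t ts =>
    rw [hts] at hmap
    rw [← hmap] at hB
    simp only [List.map_cons, List.headD_cons] at hB
    simp only [List.headD_cons]
    rw [← hB, String.ofList_toList]
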